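-- pv_equiv track=rewrite | github.com/HansalBhangale/data | gui/core/rebalance.py | get_rebalance_summary_text
-- ===== SOURCE A (Python) =====
-- from typing import Dict, List, Optional
--
-- def get_rebalance_summary_text(actions: List[Dict]) -> str:
--     """Generate human-readable rebalance summary."""
--     if not actions:
--         return "No rebalancing needed."
--
--     buys = [a for a in actions if a['action'] == 'BUY']
--     sells = [a for a in actions if a['action'] == 'SELL']
--     holds = [a for a in actions if a['action'] == 'HOLD']
--
--     lines = []
--     if buys:
--         lines.append(f"🟢 BUY {len(buys)}: {', '.join(a['ticker'] for a in buys)}")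
--     if sells:
--         lines.append(f"🔴 SELL {len(sells)}: {', '.join(a['ticker'] for a in sells)}")
--     if holds:
--         lines.append(f"⚪ HOLD {len(holds)}: {', '.join(a['ticker'] for a in holds)}")
--
--     return " | ".join(lines)
-- ===== SOURCE B (Python) =====
-- def get_rebalance_summary_text(actions):
--     """Generate human-readable rebalance summary (single grouping pass)."""
--     if not actions:
--         return "No rebalancing needed."
--
--     groups = {'BUY': [], 'SELL': [], 'HOLD': []}
--     for a in actions:
--         act = a['action']
--         if act in groups:
--             groups[act].append(a['ticker'])
--
--     lines = []
--     for key, label in [('BUY', '\U0001F7E2 BUY'), ('SELL', '\U0001F534 SELL'), ('HOLD', '\u26AA HOLD')]: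
--         tickers = groups[key]
--         if tickers:
--             lines.append(f"{label} {len(tickers)}: {', '.join(tickers)}")
--     return " | ".join(lines)
-- ===== Notes on version B (the rewrite author's own statement) =====
-- stated objective: alternative
-- what changed: Replaces A's three separate filtering scans over actions (one per action kind) by a single grouping pass that collects tickers into a dict keyed by action, followed by a fixed-order emit loop over (key, label) pairs.
import Mathlib
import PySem

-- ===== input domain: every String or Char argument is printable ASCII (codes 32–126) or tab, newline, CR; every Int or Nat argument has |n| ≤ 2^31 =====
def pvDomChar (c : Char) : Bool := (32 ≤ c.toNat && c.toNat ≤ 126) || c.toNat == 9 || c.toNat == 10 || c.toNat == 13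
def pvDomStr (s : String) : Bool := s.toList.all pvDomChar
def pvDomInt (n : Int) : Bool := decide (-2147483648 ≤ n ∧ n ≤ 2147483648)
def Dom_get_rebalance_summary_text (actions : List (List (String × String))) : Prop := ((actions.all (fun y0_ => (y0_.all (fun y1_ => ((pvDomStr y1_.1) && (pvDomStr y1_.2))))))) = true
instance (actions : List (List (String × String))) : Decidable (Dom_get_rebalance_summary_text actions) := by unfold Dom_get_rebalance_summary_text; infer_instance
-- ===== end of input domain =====

-- ===== PORT A =====
-- B is a one-pass grouping re-implementation of A (objective: alternative decomposition); equal return value proved on Pre_.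
-- dict values are association lists; lookup is first match (dicts have unique keys, so this is Python's lookup).
def pvGetD (a : List (String × String)) (k : String) : String :=
  match a.find? (fun p => p.1 == k) with
  | some p => p.2
  | none => ""

def pvHasKey (a : List (String × String)) (k : String) : Bool :=
  a.any (fun p => p.1 == k)

-- literal transliteration of A: three filtering scans, then three guarded line appends
def get_rebalance_summary_text (actions : List (List (String × String))) : String :=
  if actions = [] then "No rebalancing needed." else
  let buys := actions.filter (fun a => pvGetD a "action" == "BUY")
  let sells := actions.filter (fun a => pvGetD a "action" == "SELL")
  let holds := actions.filter (fun a => pvGetD a "action" == "HOLD")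
  let lines : List String :=
    (if buys ≠ [] then ["🟢 BUY " ++ PySem.Int.toStr buys.length ++ ": " ++
        PySem.Str.join ", " (buys.map (fun a => pvGetD a "ticker"))] else []) ++
    (if sells ≠ [] then ["🔴 SELL " ++ PySem.Int.toStr sells.length ++ ": " ++
        PySem.Str.join ", " (sells.map (fun a => pvGetD a "ticker"))] else []) ++
    (if holds ≠ [] then ["⚪ HOLD " ++ PySem.Int.toStr holds.length ++ ": " ++
        PySem.Str.join ", " (holds.map (fun a => pvGetD a "ticker"))] else [])
  PySem.Str.join " | " lines

-- ===== PORT B =====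
-- the body of B's single grouping loop
def pvStep (g : PySem.Dict String (List String)) (a : List (String × String)) :
    PySem.Dict String (List String) :=
  let act := pvGetD a "action"
  if g.contains act then g.modify act [] (· ++ [pvGetD a "ticker"]) else g

-- literal transliteration of B: one grouping pass into a dict, then a fixed-order emit loop
def get_rebalance_summary_text_alt (actions : List (List (String × String))) : String :=
  if actions = [] then "No rebalancing needed." else
  let groups := actions.foldl pvStep
    (((PySem.Dict.empty.insert "BUY" []).insert "SELL" []).insert "HOLD" [])
  let lines := [("BUY", "🟢 BUY"), ("SELL", "🔴 SELL"), ("HOLD", "⚪ HOLD")].foldl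
    (fun (ls : List String) (kv : String × String) =>
      let tickers := groups.getD kv.1 []
      if tickers ≠ [] then
        ls ++ [kv.2 ++ " " ++ PySem.Int.toStr tickers.length ++ ": " ++ PySem.Str.join ", " tickers]
      else ls) []
  PySem.Str.join " | " lines

-- ===== PRECONDITION & SPEC =====
-- Pre_ excludes exactly the inputs where Python A raises KeyError: an action without an
-- 'action' key, or a BUY/SELL/HOLD action without a 'ticker' key.
def Pre_get_rebalance_summary_text (actions : List (List (String × String))) : Prop :=
  ∀ a ∈ actions, pvHasKey a "action" = true ∧
    (pvGetD a "action" ∈ (["BUY", "SELL", "HOLD"] : List String) → pvHasKey a "ticker" = true)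
instance (actions : List (List (String × String))) : Decidable (Pre_get_rebalance_summary_text actions) := by
  unfold Pre_get_rebalance_summary_text; infer_instance

def pvWitness_get_rebalance_summary_text : (List (List (String × String))) :=
  [[("action", "BUY"), ("ticker", "AAPL")], [("action", "HOLD"), ("ticker", "MSFT")]]

def Spec_get_rebalance_summary_text (actions : List (List (String × String))) (out : String) : Prop := out = get_rebalance_summary_text_alt actions
instance (actions : List (List (String × String))) (out : String) : Decidable (Spec_get_rebalance_summary_text actions out) := by unfold Spec_get_rebalance_summary_text; infer_instance

-- ===== CLAIM (what is proved, stated in full; the proofs are below) =====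
def Claim_equal_get_rebalance_summary_text : Prop := ∀ (actions : List (List (String × String))), Dom_get_rebalance_summary_text actions → Pre_get_rebalance_summary_text actions → Spec_get_rebalance_summary_text actions (get_rebalance_summary_text actions)

-- ===== LEMMAS AND PROOFS =====

-- tickers of the actions whose 'action' is act, in order
def pvTks (act : String) (actions : List (List (String × String))) : List String :=
  (actions.filter (fun a => pvGetD a "action" == act)).map (fun a => pvGetD a "ticker")

-- invariant of B's grouping fold
theorem fold_groups (actions : List (List (String × String))) (b s h : List String) :
    actions.foldl pvStep (PySem.Dict.mk [("BUY", b), ("SELL", s), ("HOLD", h)]) =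
      PySem.Dict.mk [("BUY", b ++ pvTks "BUY" actions), ("SELL", s ++ pvTks "SELL" actions),
        ("HOLD", h ++ pvTks "HOLD" actions)] := by
  induction actions generalizing b s h with
  | nil => simp [pvTks]
  | cons a rest ih =>
    by_cases hB : pvGetD a "action" = "BUY"
    · simp [List.foldl, pvStep, hB, PySem.Dict.contains, PySem.Dict.modify, PySem.Dict.insert, PySem.Dict.getD, PySem.Dict.get?, pvTks, ih]
    · by_cases hS : pvGetD a "action" = "SELL"
      · simp [List.foldl, pvStep, hS, PySem.Dict.contains, PySem.Dict.modify, PySem.Dict.insert, PySem.Dict.getD, PySem.Dict.get?, pvTks, ih]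
      · by_cases hH : pvGetD a "action" = "HOLD"
        · simp [List.foldl, pvStep, hH, PySem.Dict.contains, PySem.Dict.modify, PySem.Dict.insert, PySem.Dict.getD, PySem.Dict.get?, pvTks, ih]
        · simp [List.foldl, pvStep, hB, hS, hH, Ne.symm hB, Ne.symm hS, Ne.symm hH, PySem.Dict.contains, pvTks, ih]

-- ===== VERDICT (by name: the statement is the Claim_ definition above) =====
theorem get_rebalance_summary_text_spec : Claim_equal_get_rebalance_summary_text := by
  intro actions _ _
  unfold Spec_get_rebalance_summary_text get_rebalance_summary_text get_rebalance_summary_text_alt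
  by_cases hnil : actions = []
  · simp [hnil]
  · have hinit : (((PySem.Dict.empty.insert "BUY" ([] : List String)).insert "SELL" []).insert "HOLD" []) =
        PySem.Dict.mk [("BUY", []), ("SELL", []), ("HOLD", [])] := rfl
    simp only [hnil, hinit, fold_groups, List.nil_append, List.foldl]
    simp [PySem.Dict.getD, PySem.Dict.get?, pvTks, List.map_eq_nil_iff, List.length_map]
    split_ifs <;> simp
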